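-- pv_equiv track=rewrite | github.com/zjma/codegames | gcj2023/c.py | work
-- ===== SOURCE A (Python) =====
-- def work(colors):
--     n=len(colors)
--     seen = set()
--     ans = []
--     for i in range(n):
--         if i==0 or colors[i]!=colors[i-1]:
--             # start of a segment of colors[i]
--             if colors[i] in seen:
--                 return None
--             seen.add(colors[i])
--             ans.append(colors[i])
--     return ans
-- ===== SOURCE B (Python) =====
-- def work(colors):
--     # A run-counting argument: the number of runs (adjacent boundaries + 1) always
--     # >= the number of distinct colors, with equality iff every color's occurrences
--     # are contiguous; in that case the segment sequence is exactly the distinct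
--     # colors in first-occurrence order.
--     distinct = list(dict.fromkeys(colors))
--     boundaries = sum(1 for a, b in zip(colors, colors[1:]) if a != b)
--     if colors and boundaries + 1 != len(distinct):
--         return None
--     return distinct
-- ===== Notes on version B (the rewrite author's own statement) =====
-- stated objective: alternative
-- what changed: Replaced A's fused scan (seen-set + early return while collapsing runs) by a run-counting argument: the answer is the global first-occurrence dedup list(dict.fromkeys(colors)), valid iff the count of adjacent boundaries plus one equals the number of distinct colors; no run list and no per-element set lookup with early exit.
import Mathlib
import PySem

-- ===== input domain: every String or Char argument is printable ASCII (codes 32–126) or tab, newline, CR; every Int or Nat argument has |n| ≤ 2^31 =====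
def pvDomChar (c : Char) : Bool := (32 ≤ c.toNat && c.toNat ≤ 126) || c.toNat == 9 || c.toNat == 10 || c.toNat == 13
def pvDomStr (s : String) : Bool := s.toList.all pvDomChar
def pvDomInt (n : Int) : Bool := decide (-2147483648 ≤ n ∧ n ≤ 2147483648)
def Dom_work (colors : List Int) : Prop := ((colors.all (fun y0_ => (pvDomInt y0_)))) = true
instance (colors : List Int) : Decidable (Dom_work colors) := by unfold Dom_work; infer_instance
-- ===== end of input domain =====

-- B replaces A's fused seen-set scan by first-occurrence dedup plus a boundary-count validity check (return value only; no side effects involved).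

-- ===== PORT A =====
-- A's index loop 'for i in range(n)' carrying seen/ans, written as the structural
-- recursion over the list with prev = colors[i-1]; branches in A's order.
def workGo (rest : List Int) (prev : Option Int) (seen : PySem.Set Int) (ans : List Int) : Option (List Int) :=
  match rest with
  | [] => some ans
  | c :: rest' =>
    if prev ≠ some c then
      if PySem.Set.contains seen c then none
      else workGo rest' (some c) (PySem.Set.add seen c) (ans ++ [c])
    else workGo rest' (some c) seen ans

def work (colors : List Int) : Option (List Int) :=
  workGo colors none PySem.Set.empty []

-- ===== PORT B =====
-- distinct = list(dict.fromkeys(colors)) is PySem.List.dedup (first occurrences, in order);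
-- boundaries = sum over zip(colors, colors[1:]) — colors[1:] is colors.drop 1 (exact: start 1 ≥ 0).
def work_alt (colors : List Int) : Option (List Int) :=
  let distinct := PySem.List.dedup colors
  let boundaries := ((colors.zip (colors.drop 1)).filter (fun p => decide (p.1 ≠ p.2))).length
  if colors ≠ [] ∧ boundaries + 1 ≠ distinct.length then none else some distinct

-- ===== PRECONDITION & SPEC =====
def Spec_work (colors : List Int) (out : Option (List Int)) : Prop := out = work_alt colors
instance (colors : List Int) (out : Option (List Int)) : Decidable (Spec_work colors out) := by unfold Spec_work; infer_instance

-- ===== CLAIM (what is proved, stated in full; the proofs are below) =====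
def Claim_equal_work : Prop := ∀ (colors : List Int), Dom_work colors → Spec_work colors (work colors)

-- ===== LEMMAS AND PROOFS =====

-- reference consecutive-dedup (run heads), relative to the previous element
def dcAux (rest : List Int) (prev : Option Int) : List Int :=
  match rest with
  | [] => []
  | c :: rest' => if prev ≠ some c then c :: dcAux rest' (some c) else dcAux rest' prev

-- B's boundary count, abbreviated
def bcount (l : List Int) : Nat :=
  ((l.zip (l.drop 1)).filter (fun p => decide (p.1 ≠ p.2))).length

-- ===== A-side characterisation: work l = (run heads, if pairwise distinct) =====
theorem workGo_eq (rest : List Int) (prev : Option Int) (seen : PySem.Set Int) (ans : List Int)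
    (hseen : ∀ x, x ∈ seen ↔ x ∈ ans) (hnd : ans.Nodup) :
    workGo rest prev seen ans
      = if (ans ++ dcAux rest prev).Nodup then some (ans ++ dcAux rest prev) else none := by
  induction rest generalizing prev seen ans with
  | nil => simp [workGo, dcAux, hnd]
  | cons c rest' ih =>
    by_cases h : prev = some c
    · simp only [workGo, dcAux, h]
      simp only [ite_not]
      simpa using ih (some c) seen ans hseen hnd
    · simp only [workGo, dcAux, if_pos (by simp [h] : prev ≠ some c)]
      by_cases hc : c ∈ ans
      · have : PySem.Set.contains seen c = true := by
          rw [PySem.Set.contains_iff]; exact (hseen c).2 hc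
        rw [if_pos this]
        have : ¬ (ans ++ c :: dcAux rest' (some c)).Nodup := by
          intro hnod
          exact (List.disjoint_of_nodup_append hnod) hc (by simp)
        simp [this]
      · have : ¬ PySem.Set.contains seen c = true := by
          rw [PySem.Set.contains_iff]; intro hmem; exact hc ((hseen c).1 hmem)
        rw [if_neg this]
        have hseen' : ∀ x, x ∈ PySem.Set.add seen c ↔ x ∈ ans ++ [c] := by
          intro x; rw [PySem.Set.mem_add]; simp [hseen x]
        have hnd' : (ans ++ [c]).Nodup :=
          hnd.append (List.nodup_singleton c) (List.disjoint_singleton.2 hc)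
        rw [ih (some c) _ _ hseen' hnd']
        simp only [List.append_assoc, List.singleton_append]

theorem work_eq (colors : List Int) :
    work colors = if (dcAux colors none).Nodup then some (dcAux colors none) else none := by
  have := workGo_eq colors none PySem.Set.empty []
    (by intro x; simp [PySem.Set.empty]) (by simp)
  simpa [work] using this

-- ===== collapse lemmas: everything is invariant under removing one adjacent duplicate =====
theorem dcAux_cons_cons_eq (c : Int) (t : List Int) :
    dcAux (c :: c :: t) none = dcAux (c :: t) none := by
  simp [dcAux]

theorem dcAux_cons_cons_ne (c b : Int) (t : List Int) (h : c ≠ b) :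
    dcAux (c :: b :: t) none = c :: dcAux (b :: t) none := by
  simp [dcAux, h]

theorem dedup_cons_cons_eq (c : Int) (t : List Int) :
    PySem.List.dedup (c :: c :: t) = PySem.List.dedup (c :: t) := by
  simp only [PySem.List.dedup_eq_ofList, PySem.Set.ofList_cons, PySem.Set.discard]
  rw [List.filter_cons_of_neg (by simp), List.filter_filter]
  simp

theorem dedup_cons_of_not_mem (c : Int) (t : List Int) (h : c ∉ t) :
    PySem.List.dedup (c :: t) = c :: PySem.List.dedup t := by
  simp only [PySem.List.dedup_eq_ofList, PySem.Set.ofList_cons, PySem.Set.discard]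
  rw [List.filter_eq_self.2]
  intro a ha
  have hat : a ∈ t := (PySem.Set.mem_ofList t a).1 ha
  have hne : a ≠ c := fun he => h (he ▸ hat)
  simp [hne]

theorem bcount_cons_cons_eq (c : Int) (t : List Int) :
    bcount (c :: c :: t) = bcount (c :: t) := by
  simp [bcount]

theorem bcount_cons_cons_ne (c b : Int) (t : List Int) (h : c ≠ b) :
    bcount (c :: b :: t) = 1 + bcount (b :: t) := by
  simp [bcount, h, Nat.add_comm]

-- ===== membership: run heads are exactly the elements =====
theorem mem_dcAux_imp (l : List Int) (prev : Option Int) (x : Int) :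
    x ∈ dcAux l prev → x ∈ l := by
  induction l generalizing prev with
  | nil => simp [dcAux]
  | cons c t ih =>
    intro hx
    by_cases h : prev = some c
    · simp only [dcAux, h] at hx
      simp only [ite_not] at hx
      exact List.mem_cons_of_mem c (ih _ hx)
    · simp only [dcAux, if_pos (by simp [h] : prev ≠ some c)] at hx
      rcases List.mem_cons.1 hx with rfl | hx
      · exact List.mem_cons_self
      · exact List.mem_cons_of_mem c (ih _ hx)

theorem mem_imp_dcAux (l : List Int) (prev : Option Int) (x : Int) :
    x ∈ l → x ∈ dcAux l prev ∨ prev = some x := by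
  induction l generalizing prev with
  | nil => simp
  | cons c t ih =>
    intro hx
    by_cases h : prev = some c
    · subst h
      simp only [dcAux, ite_not, if_pos]
      rcases List.mem_cons.1 hx with rfl | hx
      · exact Or.inr rfl
      · rcases ih (some c) hx with hm | he
        · exact Or.inl hm
        · exact Or.inr he
    · simp only [dcAux, if_pos (by simp [h] : prev ≠ some c)]
      rcases List.mem_cons.1 hx with rfl | hx
      · exact Or.inl List.mem_cons_self
      · rcases ih (some c) hx with hm | he
        · exact Or.inl (List.mem_cons_of_mem c hm)
        · rcases Option.some.inj he with rfl
          exact Or.inl List.mem_cons_self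

theorem mem_dcAux_none (l : List Int) (x : Int) : x ∈ dcAux l none ↔ x ∈ l := by
  constructor
  · exact mem_dcAux_imp l none x
  · intro hx
    rcases mem_imp_dcAux l none x hx with hm | he
    · exact hm
    · exact absurd he (by simp)

theorem toFinset_dcAux (l : List Int) : (dcAux l none).toFinset = l.toFinset := by
  ext x; simp [mem_dcAux_none]

-- ===== counting =====
theorem dedup_length_eq_card (l : List Int) :
    (PySem.List.dedup l).length = l.toFinset.card := by
  have hnd : (PySem.List.dedup l).Nodup := by
    rw [PySem.List.dedup_eq_ofList]; exact PySem.Set.nodup_ofList l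
  have hts : (PySem.List.dedup l).toFinset = l.toFinset := by
    ext x
    simp [PySem.List.dedup_eq_ofList, PySem.Set.mem_ofList]
  rw [← List.toFinset_card_of_nodup hnd, hts]

theorem nodup_dcAux_iff (l : List Int) :
    (dcAux l none).Nodup ↔ (dcAux l none).length = l.toFinset.card := by
  constructor
  · intro h
    rw [← List.toFinset_card_of_nodup h, toFinset_dcAux]
  · intro h
    have h1 : (dcAux l none).dedup.length = (dcAux l none).length := by
      rw [← List.card_toFinset, toFinset_dcAux]; exact h.symm
    have h2 : (dcAux l none).dedup = dcAux l none :=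
      (List.dedup_sublist _).eq_of_length h1
    exact List.dedup_eq_self.1 h2

-- bcount counts the boundaries: #runs = boundaries + 1 on nonempty lists
theorem runs_count (t : List Int) : ∀ b : Int, bcount (b :: t) + 1 = (dcAux (b :: t) none).length := by
  induction t with
  | nil => intro b; simp [bcount, dcAux]
  | cons b' t' ih =>
    intro b
    by_cases h : b = b'
    · subst h
      rw [bcount_cons_cons_eq, dcAux_cons_cons_eq]
      exact ih b
    · rw [bcount_cons_cons_ne b b' t' h, dcAux_cons_cons_ne b b' t' h]
      have h2 := ih b'
      simp only [List.length_cons]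
      omega

-- when the run heads are pairwise distinct they are the first occurrences
theorem dcAux_eq_dedup (l : List Int) (h : (dcAux l none).Nodup) :
    dcAux l none = PySem.List.dedup l := by
  induction l with
  | nil => simp [dcAux, PySem.List.dedup_eq_ofList, PySem.Set.ofList_nil]
  | cons c t ih =>
    cases t with
    | nil =>
      simp [dcAux, PySem.List.dedup_eq_ofList, PySem.Set.ofList_cons,
        PySem.Set.ofList_nil, PySem.Set.discard]
    | cons b t' =>
      by_cases hcb : c = b
      · subst hcb
        rw [dcAux_cons_cons_eq, dedup_cons_cons_eq]
        exact ih (by rwa [dcAux_cons_cons_eq] at h)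
      · rw [dcAux_cons_cons_ne c b t' hcb] at h ⊢
        have hnd := (List.nodup_cons.1 h).2
        have hcm : c ∉ dcAux (b :: t') none := (List.nodup_cons.1 h).1
        have hcl : c ∉ (b :: t') := fun hm => hcm ((mem_dcAux_none _ c).2 hm)
        rw [ih hnd, dedup_cons_of_not_mem c (b :: t') hcl]

-- ===== VERDICT helper: the two characterisations agree =====
theorem work_eq_work_alt (colors : List Int) : work colors = work_alt colors := by
  rw [work_eq]
  cases colors with
  | nil => simp [dcAux, work_alt, PySem.List.dedup_eq_ofList, PySem.Set.ofList_nil]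
  | cons c t =>
    show _ = work_alt (c :: t)
    unfold work_alt
    simp only [ne_eq, reduceCtorEq, not_false_eq_true, true_and]
    have hb : (((c :: t).zip ((c :: t).drop 1)).filter (fun p => decide (p.1 ≠ p.2))).length
        = bcount (c :: t) := rfl
    rw [hb, runs_count t c, dedup_length_eq_card]
    by_cases hnd : (dcAux (c :: t) none).Nodup
    · rw [if_pos hnd, if_neg (not_not.2 ((nodup_dcAux_iff (c :: t)).1 hnd))]
      rw [dcAux_eq_dedup _ hnd]
    · rw [if_neg hnd, if_pos (fun he => hnd ((nodup_dcAux_iff (c :: t)).2 he))]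

-- ===== VERDICT (by name: the statement is the Claim_ definition above) =====
theorem work_spec : Claim_equal_work := by
  intro colors _
  unfold Spec_work
  exact work_eq_work_alt colors
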